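-- pv_equiv track=rewrite | github.com/sl-harris/aoc-2024 | day4/main.py | find_mas_diag_lr
-- ===== SOURCE A (Python) =====
-- def find_mas_diag_lr(input):
--     # Diag LR
--     input_diag_lr = []
--     coord = []
--
--     for c in reversed(range(len(input))):
--         diag_line = ""
--
--         for i in range(len(input) - c):
--             diag_line += input[i][c + i]
--
--         input_diag_lr.append(diag_line)
--         coord.append((0, c))
--
--     for r in range(1, len(input)):
--         diag_line = ""
--
--         for i in range(len(input) - r):
--             diag_line += input[r + i][i]
--
--         input_diag_lr.append(diag_line)
--         coord.append((r, 0))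
--
--     mas_coords = find_mas_rl(input_diag_lr, coord)
--
--     input_diag_lr_rev = [line[::-1] for line in input_diag_lr]
--     mas_coords += find_mas_rl(input_diag_lr_rev, coord, is_rev=True)
--
--     return mas_coords
--
-- def find_mas_rl(input, coord, is_rev=False):
--     mas_centre = []
--
--     for line, (start_x, start_y) in zip(input, coord):
--         last_found = -1
--
--         for _ in range(line.count("MAS")):
--             last_found = line.find("MAS", last_found + 1)
--
--             if not is_rev:
--                 mas_centre.append((start_x + last_found + 1, start_y + last_found + 1))
--             else:
--                 mas_centre.append(
--                     (
--                         start_x + len(line) - last_found - 2,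
--                         start_y + len(line) - last_found - 2,
--                     )
--                 )
--
--     return mas_centre
-- ===== SOURCE B (Python) =====
-- def find_mas_diag_lr(input):
--     # Direct cell checks on each down-right diagonal: pass 1 scans down for M,A,S,
--     # pass 2 scans up for S,A,M (matching the order of the original's reversed-line pass).
--     n = len(input)
--     starts = [(0, c) for c in range(n - 1, -1, -1)] + [(r, 0) for r in range(1, n)]
--     res = []
--     for x0, y0 in starts:
--         length = n - max(x0, y0)
--         for k in range(length - 2):
--             if (input[x0 + k][y0 + k] == "M"
--                     and input[x0 + k + 1][y0 + k + 1] == "A"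
--                     and input[x0 + k + 2][y0 + k + 2] == "S"):
--                 res.append((x0 + k + 1, y0 + k + 1))
--     for x0, y0 in starts:
--         length = n - max(x0, y0)
--         for k in range(length - 3, -1, -1):
--             if (input[x0 + k][y0 + k] == "S"
--                     and input[x0 + k + 1][y0 + k + 1] == "A"
--                     and input[x0 + k + 2][y0 + k + 2] == "M"):
--                 res.append((x0 + k + 1, y0 + k + 1))
--     return res
-- ===== Notes on version B (the rewrite author's own statement) =====
-- stated objective: alternative
-- what changed: Instead of materialising every down-right diagonal as a string and locating 'MAS' with str.count/str.find on the string and its reversal, B checks the three grid cells M,A,S directly along each diagonal (forward pass) and S,A,M scanning upward (second pass), building no strings at all.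
import Mathlib
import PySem

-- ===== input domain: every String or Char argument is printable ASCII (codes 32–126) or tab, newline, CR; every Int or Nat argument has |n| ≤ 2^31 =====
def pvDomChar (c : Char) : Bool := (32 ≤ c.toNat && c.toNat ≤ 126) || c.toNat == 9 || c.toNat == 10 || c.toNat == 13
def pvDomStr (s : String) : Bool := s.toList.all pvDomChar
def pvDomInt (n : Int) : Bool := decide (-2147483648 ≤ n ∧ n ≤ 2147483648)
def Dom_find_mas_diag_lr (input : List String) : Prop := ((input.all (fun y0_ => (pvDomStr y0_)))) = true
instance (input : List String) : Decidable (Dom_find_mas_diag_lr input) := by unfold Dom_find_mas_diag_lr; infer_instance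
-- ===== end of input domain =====

-- ===== PORT A =====
-- B differs from A only in strategy (direct cell checks instead of diagonal strings); equal output proved below.
-- total form of input[i][j] (string row, char index); exact under Pre_ (defaults never reached there)
def pvCell (input : List String) (i j : Int) : Char :=
  PySem.List.pyGetD ((PySem.List.pyGetD input i "").toList) j ' '

-- helper find_mas_rl(input, coord, is_rev)
def pvMasRL (lines : List (List Char)) (coord : List (Int × Int)) (isRev : Bool) : List (Int × Int) :=
  (lines.zip coord).foldl (fun mas_centre lc =>
    ((List.range (PySem.Chars.count lc.1 ['M','A','S'])).foldl
      (fun (st : List (Int × Int) × Int) _ =>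
        let lf := PySem.Chars.findFrom lc.1 ['M','A','S'] (st.2 + 1) none
        (st.1 ++ [if isRev = false
            then (lc.2.1 + lf + 1, lc.2.2 + lf + 1)
            else (lc.2.1 + (lc.1.length : Int) - lf - 2, lc.2.2 + (lc.1.length : Int) - lf - 2)],
         lf))
      (mas_centre, -1)).1) []

def find_mas_diag_lr (input : List String) : List (Int × Int) :=
  let st1 := (PySem.List.pyRange 0 (PySem.List.len input) 1).reverse.foldl
    (fun (st : List (List Char) × List (Int × Int)) c =>
      let diag_line := (PySem.List.pyRange 0 (PySem.List.len input - c) 1).foldl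
        (fun dl i => dl ++ [pvCell input i (c + i)]) []
      (st.1 ++ [diag_line], st.2 ++ [((0 : Int), c)]))
    ([], [])
  let st2 := (PySem.List.pyRange 1 (PySem.List.len input) 1).foldl
    (fun (st : List (List Char) × List (Int × Int)) r =>
      let diag_line := (PySem.List.pyRange 0 (PySem.List.len input - r) 1).foldl
        (fun dl i => dl ++ [pvCell input (r + i) i]) []
      (st.1 ++ [diag_line], st.2 ++ [(r, (0 : Int))]))
    st1
  let mas_coords := pvMasRL st2.1 st2.2 false
  let revLines := st2.1.map (fun line => (PySem.List.slice? line none none (-1)).getD [])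
  mas_coords ++ pvMasRL revLines st2.2 true

-- ===== PORT B =====
def find_mas_diag_lr_alt (input : List String) : List (Int × Int) :=
  let n : Int := PySem.List.len input
  let starts := (PySem.List.pyRange (n - 1) (-1) (-1)).map (fun c => ((0 : Int), c))
      ++ (PySem.List.pyRange 1 n 1).map (fun r => (r, (0 : Int)))
  let res1 := starts.foldl (fun res s =>
    (PySem.List.pyRange 0 (n - max s.1 s.2 - 2) 1).foldl (fun res k =>
      if pvCell input (s.1 + k) (s.2 + k) = 'M' ∧ pvCell input (s.1 + k + 1) (s.2 + k + 1) = 'A'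
          ∧ pvCell input (s.1 + k + 2) (s.2 + k + 2) = 'S'
      then res ++ [(s.1 + k + 1, s.2 + k + 1)] else res) res) []
  starts.foldl (fun res s =>
    (PySem.List.pyRange (n - max s.1 s.2 - 3) (-1) (-1)).foldl (fun res k =>
      if pvCell input (s.1 + k) (s.2 + k) = 'S' ∧ pvCell input (s.1 + k + 1) (s.2 + k + 1) = 'A'
          ∧ pvCell input (s.1 + k + 2) (s.2 + k + 2) = 'M'
      then res ++ [(s.1 + k + 1, s.2 + k + 1)] else res) res) res1

-- ===== PRECONDITION & SPEC =====
-- A raises IndexError iff some row is shorter than the grid height (it reads every cell of the n x n square).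
def Pre_find_mas_diag_lr (input : List String) : Prop :=
  ∀ s ∈ input, input.length ≤ s.toList.length
instance (input : List String) : Decidable (Pre_find_mas_diag_lr input) := by
  unfold Pre_find_mas_diag_lr; infer_instance
def pvWitness_find_mas_diag_lr : List String := ["MAS", "AMX", "SXA"]
def Spec_find_mas_diag_lr (input : List String) (out : List (Int × Int)) : Prop := out = find_mas_diag_lr_alt input
instance (input : List String) (out : List (Int × Int)) : Decidable (Spec_find_mas_diag_lr input out) := by unfold Spec_find_mas_diag_lr; infer_instance

-- ===== CLAIM (what is proved, stated in full; the proofs are below) =====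
def Claim_equal_find_mas_diag_lr : Prop := ∀ (input : List String), Dom_find_mas_diag_lr input → Pre_find_mas_diag_lr input → Spec_find_mas_diag_lr input (find_mas_diag_lr input)


-- ===== LEMMAS AND PROOFS =====

-- the pattern "MAS"
def pvMAS : List Char := ['M', 'A', 'S']

-- positions (ascending) at which pvMAS occurs in cs
def pvOccs (cs : List Char) : List Nat :=
  (List.range cs.length).filter (fun q => pvMAS.isPrefixOf (cs.drop q))

-- occurrences at position ≥ k
def pvOccsFrom (cs : List Char) (k : Nat) : List Nat :=
  (pvOccs cs).filter (fun q => k ≤ q)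

-- the diagonal of length L read off a cell function f
def pvCsOf (f : Int → Char) (L : Nat) : List Char :=
  (List.range L).map (fun (j : Nat) => f (j : Int))

lemma pvFoldl_range_peel {α : Type} (F : α → α) (n : Nat) (init : α) :
    (List.range (n + 1)).foldl (fun s _ => F s) init
      = (List.range n).foldl (fun s _ => F s) (F init) := by
  rw [List.range_succ_eq_map]
  simp [List.foldl_map]

lemma pvIsPrefixOf3 (a b c : Char) (xs : List Char) :
    [a, b, c].isPrefixOf xs = true ↔ xs[0]? = some a ∧ xs[1]? = some b ∧ xs[2]? = some c := by
  match xs with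
  | [] => simp [List.isPrefixOf]
  | [x] => simp [List.isPrefixOf]
  | [x, y] => simp [List.isPrefixOf]
  | x :: y :: z :: r =>
    simp only [List.isPrefixOf, Bool.and_eq_true, beq_iff_eq, List.getElem?_cons_zero,
      List.getElem?_cons_succ, Option.some_inj]
    constructor
    · rintro ⟨h1, h2, h3, -⟩; exact ⟨h1.symm, h2.symm, h3.symm⟩
    · rintro ⟨h1, h2, h3⟩; exact ⟨h1.symm, h2.symm, h3.symm, trivial⟩

lemma pvOccs_cons (x : Char) (t : List Char) :
    pvOccs (x :: t)
      = (if pvMAS.isPrefixOf (x :: t) then [0] else []) ++ (pvOccs t).map (· + 1) := by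
  unfold pvOccs
  rw [show (x :: t).length = t.length + 1 from rfl, List.range_succ_eq_map,
    List.filter_cons, List.filter_map]
  simp only [List.drop_zero, Function.comp_def, List.drop_succ_cons]
  by_cases hp : pvMAS.isPrefixOf (x :: t) = true
  · simp [hp]
  · simp [hp]

lemma pvOccs_mas_append (r : List Char) :
    pvOccs (pvMAS ++ r) = 0 :: (pvOccs r).map (· + 3) := by
  show pvOccs ('M' :: 'A' :: 'S' :: r) = _
  rw [pvOccs_cons, pvOccs_cons, pvOccs_cons]
  simp [pvMAS, List.isPrefixOf, List.map_map, Function.comp_def, Nat.add_assoc]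

lemma pvCount_go_eq : ∀ (fuel : Nat) (l : List Char) (acc : Nat), l.length ≤ fuel →
    PySem.Chars.count.go pvMAS fuel l acc = acc + (pvOccs l).length := by
  intro fuel
  induction fuel with
  | zero =>
    intro l acc hl
    have : l = [] := by cases l <;> simp_all
    subst this
    simp [PySem.Chars.count.go, pvOccs]
  | succ fuel ih =>
    intro l acc hl
    cases l with
    | nil => simp [PySem.Chars.count.go, pvOccs]
    | cons c t =>
      rw [PySem.Chars.count.go]
      by_cases hp : pvMAS.isPrefixOf (c :: t) = true
      · rw [if_pos hp]
        obtain ⟨rest, hrest⟩ := List.isPrefixOf_iff_prefix.mp hp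
        have hlen : rest.length + 1 + 1 = t.length := by
          simpa [pvMAS] using congrArg List.length hrest
        rw [show (pvMAS : List Char).length = 3 from rfl, ← hrest]
        rw [show (pvMAS ++ rest).drop 3 = rest from rfl]
        rw [ih rest (acc + 1) (by simp at hl; omega)]
        rw [pvOccs_mas_append]
        simp
        omega
      · rw [if_neg hp, ih t acc (by simp at hl; omega)]
        rw [pvOccs_cons]
        simp [hp]

lemma pvCount_eq (cs : List Char) :
    PySem.Chars.count cs pvMAS = (pvOccs cs).length := by
  unfold PySem.Chars.count
  rw [if_neg (by simp [pvMAS])]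
  rw [pvCount_go_eq cs.length cs 0 le_rfl]
  simp

lemma pvOccs_pairwise (cs : List Char) : (pvOccs cs).Pairwise (· < ·) :=
  List.Pairwise.sublist List.filter_sublist List.pairwise_lt_range

lemma pvOccsFrom_pairwise (cs : List Char) (k : Nat) : (pvOccsFrom cs k).Pairwise (· < ·) :=
  List.Pairwise.sublist List.filter_sublist (pvOccs_pairwise cs)

lemma pvOccsFrom_zero (cs : List Char) : pvOccsFrom cs 0 = pvOccs cs := by
  unfold pvOccsFrom
  simp

lemma pvMem_occs (cs : List Char) (q : Nat) :
    q ∈ pvOccs cs ↔ q < cs.length ∧ pvMAS.isPrefixOf (cs.drop q) = true := by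
  simp [pvOccs, List.mem_filter, List.mem_range]

lemma pvFindFrom_head (cs : List Char) (k : Nat) (hk : k ≤ cs.length)
    (q : Nat) (rest : List Nat) (h : pvOccsFrom cs k = q :: rest) :
    PySem.Chars.findFrom cs pvMAS (k : Int) none = (q : Int) := by
  have hqmem : q ∈ pvOccsFrom cs k := by rw [h]; exact List.mem_cons_self
  have hqk : k ≤ q := by simpa using List.of_mem_filter hqmem
  have hqo : q ∈ pvOccs cs := List.mem_of_mem_filter hqmem
  obtain ⟨hqlen, hqpre⟩ := (pvMem_occs cs q).mp hqo
  have hqpre' : pvMAS <+: cs.drop q := List.isPrefixOf_iff_prefix.mp hqpre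
  have hinf : pvMAS <:+: cs.drop k := by
    obtain ⟨t, ht⟩ := hqpre'
    refine ⟨(cs.drop k).take (q - k), t, ?_⟩
    have hdd : (cs.drop k).drop (q - k) = cs.drop q := by
      rw [List.drop_drop]
      congr 1
      omega
    calc (cs.drop k).take (q - k) ++ pvMAS ++ t
        = (cs.drop k).take (q - k) ++ (pvMAS ++ t) := by rw [List.append_assoc]
      _ = (cs.drop k).take (q - k) ++ (cs.drop k).drop (q - k) := by rw [ht, hdd]
      _ = cs.drop k := List.take_append_drop _ _
  have hne : PySem.Chars.findFrom cs pvMAS (k : Int) none ≠ -1 := by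
    rw [ne_eq, PySem.Chars.findFrom_natCast_eq_neg_one_iff cs pvMAS k hk]
    simpa using hinf
  obtain ⟨hge, hpre, hmin⟩ := PySem.Chars.findFrom_natCast_spec cs pvMAS k hk hne
  set r := PySem.Chars.findFrom cs pvMAS (k : Int) none with hr
  have hr0 : (0 : Int) ≤ r := le_trans (by exact_mod_cast Int.natCast_nonneg k) hge
  have hrlen : r.toNat < cs.length := by
    by_contra hcon
    rw [not_lt] at hcon
    rw [List.drop_eq_nil_of_le hcon] at hpre
    have := hpre.length_le
    simp [pvMAS] at this
  have hrmem : r.toNat ∈ pvOccsFrom cs k := by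
    unfold pvOccsFrom
    rw [List.mem_filter]
    refine ⟨(pvMem_occs cs _).mpr ⟨hrlen, List.isPrefixOf_iff_prefix.mpr hpre⟩, by simp; omega⟩
  have hqr : q ≤ r.toNat := by
    rw [h] at hrmem
    rcases List.mem_cons.mp hrmem with h1 | h2
    · omega
    · have := (List.pairwise_cons.mp (h ▸ pvOccsFrom_pairwise cs k)).1 _ h2
      omega
  have hrq : ¬ q < r.toNat := fun hlt => hmin q hqk hlt hqpre'
  omega

lemma pvOccsFrom_tail (cs : List Char) (k : Nat) (q : Nat) (rest : List Nat)
    (h : pvOccsFrom cs k = q :: rest) : pvOccsFrom cs (q + 1) = rest := by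
  have hqk : k ≤ q := by
    have : q ∈ pvOccsFrom cs k := by rw [h]; exact List.mem_cons_self
    simpa using List.of_mem_filter this
  have hpw := pvOccsFrom_pairwise cs k
  rw [h] at hpw
  have hrest := (List.pairwise_cons.mp hpw).1
  have step1 : pvOccsFrom cs (q + 1)
      = (pvOccsFrom cs k).filter (fun x => q + 1 ≤ x) := by
    unfold pvOccsFrom
    rw [List.filter_filter]
    apply List.filter_congr
    intro x _
    by_cases hx : q + 1 ≤ x
    · simp [hx]
      omega
    · simp [hx]
  rw [step1, h, List.filter_cons]
  rw [if_neg (by simp)]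
  apply List.filter_eq_self.mpr
  intro x hx
  simp
  exact hrest x hx

lemma pvMasLoop_eq {β : Type} (cs : List Char) (g : Int → β) :
    ∀ (m : Nat) (k : Nat), k ≤ cs.length → (pvOccsFrom cs k).length = m → ∀ (acc : List β),
    ((List.range m).foldl
        (fun (st : List β × Int) _ =>
          (st.1 ++ [g (PySem.Chars.findFrom cs pvMAS (st.2 + 1) none)],
            PySem.Chars.findFrom cs pvMAS (st.2 + 1) none))
        (acc, (k : Int) - 1)).1
      = acc ++ (pvOccsFrom cs k).map (fun q => g (q : Int)) := by
  intro m
  induction m with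
  | zero =>
    intro k hk hlen acc
    rw [List.length_eq_zero_iff.mp hlen]
    simp
  | succ m ih =>
    intro k hk hlen acc
    cases hocc : pvOccsFrom cs k with
    | nil => rw [hocc] at hlen; simp at hlen
    | cons q rest =>
      have hfind : PySem.Chars.findFrom cs pvMAS ((k : Int) - 1 + 1) none = (q : Int) := by
        rw [show (k : Int) - 1 + 1 = (k : Int) by ring]
        exact pvFindFrom_head cs k hk q rest hocc
      rw [pvFoldl_range_peel, hfind]
      have hqlen : q < cs.length := by
        have : q ∈ pvOccs cs := List.mem_of_mem_filter (hocc ▸ List.mem_cons_self)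
        exact ((pvMem_occs cs q).mp this).1
      have htail := pvOccsFrom_tail cs k q rest hocc
      have hlen' : (pvOccsFrom cs (q + 1)).length = m := by
        rw [htail]
        rw [hocc] at hlen
        simpa using hlen
      rw [show (((acc, (k : Int) - 1).1 ++ [g ((q : Nat) : Int)], ((q : Nat) : Int)) : List β × Int)
            = (acc ++ [g ((q : Nat) : Int)], (((q + 1 : Nat)) : Int) - 1) from by
          refine Prod.ext (by simp) (by push_cast; ring)]
      rw [ih (q + 1) (by omega) hlen' (acc ++ [g ((q : Nat) : Int)]), htail]
      simp

lemma pvFilter_range_shrink (n m : Nat) (P : Nat → Bool) (hm : m ≤ n)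
    (h : ∀ q, P q = true → q < m) :
    (List.range n).filter P = (List.range m).filter P := by
  rw [show n = m + (n - m) from by omega, List.range_add, List.filter_append]
  have h2 : ((List.range (n - m)).map (m + ·)).filter P = [] := by
    apply List.filter_eq_nil_iff.mpr
    intro a ha
    simp only [List.mem_map] at ha
    obtain ⟨b, -, rfl⟩ := ha
    intro hP
    have := h _ hP
    omega
  rw [h2, List.append_nil]

lemma pvLen_csOf (f : Int → Char) (L : Nat) : (pvCsOf f L).length = L := by
  simp [pvCsOf]

lemma pvGet_csOf (f : Int → Char) (L : Nat) (i : Nat) :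
    (pvCsOf f L)[i]? = if i < L then some (f (i : Int)) else none := by
  unfold pvCsOf
  by_cases h : i < L
  · rw [List.getElem?_map, List.getElem?_range h, if_pos h]
    rfl
  · have hnone : (List.range L)[i]? = none := by
      rw [List.getElem?_eq_none_iff]
      simpa using h
    rw [List.getElem?_map, hnone, if_neg h]
    rfl

lemma pvPrefix_csOf (f : Int → Char) (L : Nat) (q : Nat) :
    pvMAS.isPrefixOf ((pvCsOf f L).drop q) = true
      ↔ q + 2 < L ∧ f (q : Int) = 'M' ∧ f ((q : Int) + 1) = 'A' ∧ f ((q : Int) + 2) = 'S' := by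
  rw [show (pvMAS : List Char) = ['M', 'A', 'S'] from rfl, pvIsPrefixOf3]
  rw [List.getElem?_drop, List.getElem?_drop, List.getElem?_drop]
  rw [pvGet_csOf, pvGet_csOf, pvGet_csOf]
  by_cases h2 : q + 2 < L
  · rw [if_pos (by omega), if_pos (by omega), if_pos (by omega)]
    push_cast
    constructor
    · rintro ⟨a, b, c⟩
      exact ⟨h2, by simpa using a, by simpa using b, by simpa using c⟩
    · rintro ⟨-, a, b, c⟩
      exact ⟨by simpa using a, by simpa using b, by simpa using c⟩
  · rw [if_neg (show ¬ (q + 2 < L) from h2)]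
    constructor
    · rintro ⟨-, -, c⟩; exact absurd c (by simp)
    · rintro ⟨hh, -⟩; omega

lemma pvPrefix_rev (f : Int → Char) (L : Nat) (p : Nat) :
    pvMAS.isPrefixOf ((pvCsOf f L).reverse.drop p) = true
      ↔ p + 2 < L ∧ f ((L : Int) - p - 1) = 'M' ∧ f ((L : Int) - p - 2) = 'A'
          ∧ f ((L : Int) - p - 3) = 'S' := by
  rw [show (pvMAS : List Char) = ['M', 'A', 'S'] from rfl, pvIsPrefixOf3]
  rw [List.getElem?_drop, List.getElem?_drop, List.getElem?_drop]
  by_cases h2 : p + 2 < L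
  · rw [List.getElem?_reverse (by simp [pvLen_csOf]; omega),
        List.getElem?_reverse (by simp [pvLen_csOf]; omega),
        List.getElem?_reverse (by simp [pvLen_csOf]; omega)]
    rw [pvLen_csOf, pvGet_csOf, pvGet_csOf, pvGet_csOf]
    rw [if_pos (by omega), if_pos (by omega), if_pos (by omega)]
    rw [show ((L - 1 - (p + 0) : Nat) : Int) = (L : Int) - p - 1 from by omega,
        show ((L - 1 - (p + 1) : Nat) : Int) = (L : Int) - p - 2 from by omega,
        show ((L - 1 - (p + 2) : Nat) : Int) = (L : Int) - p - 3 from by omega]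
    constructor
    · rintro ⟨a, b, c⟩
      exact ⟨h2, by simpa using a, by simpa using b, by simpa using c⟩
    · rintro ⟨-, a, b, c⟩
      exact ⟨by simpa using a, by simpa using b, by simpa using c⟩
  · have : (pvCsOf f L).reverse[p + 2]? = none := by
      rw [List.getElem?_eq_none_iff]
      simp [pvLen_csOf]
      omega
    rw [this]
    simp
    omega

lemma pvFwd_eq (f : Int → Char) (L : Nat) (x0 y0 : Int) (res0 : List (Int × Int)) :
    (PySem.List.pyRange 0 ((L : Int) - 2) 1).foldl
        (fun res k => if f k = 'M' ∧ f (k + 1) = 'A' ∧ f (k + 2) = 'S'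
          then res ++ [(x0 + k + 1, y0 + k + 1)] else res) res0
      = res0 ++ (pvOccs (pvCsOf f L)).map
          (fun (q : Nat) => (x0 + (q : Int) + 1, y0 + (q : Int) + 1)) := by
  rw [PySem.List.foldl_append_ite
    (p := fun k => f k = 'M' ∧ f (k + 1) = 'A' ∧ f (k + 2) = 'S')
    (f := fun k => (x0 + k + 1, y0 + k + 1))]
  congr 1
  rw [PySem.List.pyRange_one, show ((L : Int) - 2 - 0).toNat = L - 2 from by omega]
  rw [List.filter_map, List.map_map]
  have hocc : pvOccs (pvCsOf f L)
      = (List.range (L - 2)).filter (fun q => pvMAS.isPrefixOf ((pvCsOf f L).drop q)) := by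
    unfold pvOccs
    rw [pvLen_csOf]
    exact pvFilter_range_shrink L (L - 2) _ (by omega) (fun q hq => by
      have := ((pvPrefix_csOf f L q).mp hq).1
      omega)
  rw [hocc]
  rw [List.filter_congr (q := fun q => pvMAS.isPrefixOf ((pvCsOf f L).drop q)) ?_]
  · apply List.map_congr_left
    intro q hq
    simp only [Function.comp_def, Prod.mk.injEq]
    constructor <;> ring
  · intro q hq
    rw [List.mem_range] at hq
    rw [Bool.eq_iff_iff]
    simp only [Function.comp_def, decide_eq_true_eq, pvPrefix_csOf]
    constructor
    · rintro ⟨a, b, c⟩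
      refine ⟨by omega, by simpa using a, ?_, ?_⟩
      · rw [show (q : Int) + 1 = 0 + (q : Int) + 1 from by ring]; exact b
      · rw [show (q : Int) + 2 = 0 + (q : Int) + 2 from by ring]; exact c
    · rintro ⟨-, a, b, c⟩
      refine ⟨by simpa using a, ?_, ?_⟩
      · rw [show (0 : Int) + (q : Int) + 1 = (q : Int) + 1 from by ring]; exact b
      · rw [show (0 : Int) + (q : Int) + 2 = (q : Int) + 2 from by ring]; exact c

lemma pvRev_eq (f : Int → Char) (L : Nat) (x0 y0 : Int) (res0 : List (Int × Int)) :
    (PySem.List.pyRange ((L : Int) - 3) (-1) (-1)).foldl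
        (fun res k => if f k = 'S' ∧ f (k + 1) = 'A' ∧ f (k + 2) = 'M'
          then res ++ [(x0 + k + 1, y0 + k + 1)] else res) res0
      = res0 ++ (pvOccs (pvCsOf f L).reverse).map
          (fun (p : Nat) => (x0 + (L : Int) - (p : Int) - 2, y0 + (L : Int) - (p : Int) - 2)) := by
  rw [PySem.List.foldl_append_ite
    (p := fun k => f k = 'S' ∧ f (k + 1) = 'A' ∧ f (k + 2) = 'M')
    (f := fun k => (x0 + k + 1, y0 + k + 1))]
  congr 1
  rw [PySem.List.pyRange_neg_one, show ((L : Int) - 3 - (-1)).toNat = L - 2 from by omega]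
  rw [List.filter_map, List.map_map]
  have hocc : pvOccs (pvCsOf f L).reverse
      = (List.range (L - 2)).filter
          (fun p => pvMAS.isPrefixOf ((pvCsOf f L).reverse.drop p)) := by
    unfold pvOccs
    rw [List.length_reverse, pvLen_csOf]
    exact pvFilter_range_shrink L (L - 2) _ (by omega) (fun p hp => by
      have := ((pvPrefix_rev f L p).mp hp).1
      omega)
  rw [hocc]
  rw [List.filter_congr (q := fun p => pvMAS.isPrefixOf ((pvCsOf f L).reverse.drop p)) ?_]
  · apply List.map_congr_left
    intro p hp
    simp only [Function.comp_def, Prod.mk.injEq]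
    constructor <;> ring
  · intro p hp
    rw [List.mem_range] at hp
    rw [Bool.eq_iff_iff]
    simp only [Function.comp_def, decide_eq_true_eq, pvPrefix_rev]
    constructor
    · rintro ⟨a, b, c⟩
      refine ⟨by omega, ?_, ?_, ?_⟩
      · rw [show (L : Int) - p - 1 = (L : Int) - 3 - (p : Int) + 2 from by ring]; exact c
      · rw [show (L : Int) - p - 2 = (L : Int) - 3 - (p : Int) + 1 from by ring]; exact b
      · rw [show (L : Int) - p - 3 = (L : Int) - 3 - (p : Int) from by ring]; exact a
    · rintro ⟨-, a, b, c⟩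
      refine ⟨?_, ?_, ?_⟩
      · rw [show (L : Int) - 3 - (p : Int) = (L : Int) - p - 3 from by ring]; exact c
      · rw [show (L : Int) - 3 - (p : Int) + 1 = (L : Int) - p - 2 from by ring]; exact b
      · rw [show (L : Int) - 3 - (p : Int) + 2 = (L : Int) - p - 1 from by ring]; exact a

lemma pvMasRL_false (lines : List (List Char)) (coord : List (Int × Int)) :
    pvMasRL lines coord false = (lines.zip coord).flatMap (fun lc =>
      (pvOccs lc.1).map (fun (q : Nat) => (lc.2.1 + (q : Int) + 1, lc.2.2 + (q : Int) + 1))) := by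
  unfold pvMasRL
  refine Eq.trans (PySem.List.foldl_congr_mem
    (g := fun (acc : List (Int × Int)) (lc : List Char × (Int × Int)) => acc ++ (pvOccs lc.1).map
      (fun (q : Nat) => (lc.2.1 + (q : Int) + 1, lc.2.2 + (q : Int) + 1))) _ _ _ ?_) ?_
  case refine_2 =>
    rw [PySem.List.foldl_append_eq_flatMap]
    simp
  case refine_1 =>
    intro acc lc _
    simp only []
    rw [show (['M', 'A', 'S'] : List Char) = pvMAS from rfl]
    rw [pvCount_eq]
    have hloop := pvMasLoop_eq lc.1
      (fun lf => (lc.2.1 + lf + 1, lc.2.2 + lf + 1))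
      (pvOccsFrom lc.1 0).length 0 (Nat.zero_le _) rfl acc
    rw [pvOccsFrom_zero] at hloop
    rw [show ((0 : Nat) : Int) - 1 = (-1 : Int) from by norm_num] at hloop
    simp only [if_true]
    rw [hloop]
    congr 1
    show List.map _ (List.flatMap (fun a => [((a : Nat) : Int)]) (pvOccs lc.1)) = _
    rw [← List.map_eq_flatMap, List.map_map]
    rfl

lemma pvMasRL_true (lines : List (List Char)) (coord : List (Int × Int)) :
    pvMasRL lines coord true = (lines.zip coord).flatMap (fun lc =>
      (pvOccs lc.1).map (fun (q : Nat) =>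
        (lc.2.1 + (lc.1.length : Int) - (q : Int) - 2,
         lc.2.2 + (lc.1.length : Int) - (q : Int) - 2))) := by
  unfold pvMasRL
  refine Eq.trans (PySem.List.foldl_congr_mem
    (g := fun (acc : List (Int × Int)) (lc : List Char × (Int × Int)) => acc ++ (pvOccs lc.1).map
      (fun (q : Nat) =>
        (lc.2.1 + (lc.1.length : Int) - (q : Int) - 2,
         lc.2.2 + (lc.1.length : Int) - (q : Int) - 2))) _ _ _ ?_) ?_
  case refine_2 =>
    rw [PySem.List.foldl_append_eq_flatMap]
    simp
  case refine_1 =>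
    intro acc lc _
    simp only []
    rw [show (['M', 'A', 'S'] : List Char) = pvMAS from rfl]
    rw [pvCount_eq]
    have hloop := pvMasLoop_eq lc.1
      (fun lf => (lc.2.1 + (lc.1.length : Int) - lf - 2, lc.2.2 + (lc.1.length : Int) - lf - 2))
      (pvOccsFrom lc.1 0).length 0 (Nat.zero_le _) rfl acc
    rw [pvOccsFrom_zero] at hloop
    rw [show ((0 : Nat) : Int) - 1 = (-1 : Int) from by norm_num] at hloop
    simp only [Bool.true_eq_false, if_false]
    rw [hloop]
    congr 1
    show List.map _ (List.flatMap (fun a => [((a : Nat) : Int)]) (pvOccs lc.1)) = _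
    rw [← List.map_eq_flatMap, List.map_map]
    rfl

-- canonical per-diagonal data: cell function, length, characters, start list, normal form
def pvF (input : List String) (s : Int × Int) : Int → Char :=
  fun k => pvCell input (s.1 + k) (s.2 + k)

def pvL (input : List String) (s : Int × Int) : Nat :=
  ((input.length : Int) - max s.1 s.2).toNat

def pvCS (input : List String) (s : Int × Int) : List Char :=
  pvCsOf (pvF input s) (pvL input s)

def pvCoords (input : List String) : List (Int × Int) :=
  (PySem.List.pyRange 0 (input.length : Int) 1).reverse.map (fun c => ((0 : Int), c))
    ++ (PySem.List.pyRange 1 (input.length : Int) 1).map (fun r => (r, (0 : Int)))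

def pvNF (input : List String) : List (Int × Int) :=
  (pvCoords input).flatMap (fun s => (pvOccs (pvCS input s)).map
      (fun (q : Nat) => (s.1 + (q : Int) + 1, s.2 + (q : Int) + 1)))
    ++ (pvCoords input).flatMap (fun s => (pvOccs (pvCS input s).reverse).map
      (fun (p : Nat) => (s.1 + (pvL input s : Int) - (p : Int) - 2,
        s.2 + (pvL input s : Int) - (p : Int) - 2)))

lemma pvCoords_mem (input : List String) (s : Int × Int) (hs : s ∈ pvCoords input) :
    0 ≤ s.1 ∧ 0 ≤ s.2 ∧ max s.1 s.2 < (input.length : Int) := by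
  unfold pvCoords at hs
  rcases List.mem_append.mp hs with h | h
  · obtain ⟨c, hc, rfl⟩ := List.mem_map.mp h
    rw [List.mem_reverse, PySem.List.mem_pyRange_one] at hc
    exact ⟨le_refl 0, hc.1, by rw [max_eq_right hc.1]; exact hc.2⟩
  · obtain ⟨r, hr, rfl⟩ := List.mem_map.mp h
    rw [PySem.List.mem_pyRange_one] at hr
    exact ⟨by omega, le_refl 0, by rw [max_eq_left (by omega)]; exact hr.2⟩

lemma pvL_int (input : List String) (s : Int × Int) (hs : s ∈ pvCoords input) :
    (pvL input s : Int) = (input.length : Int) - max s.1 s.2 := by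
  obtain ⟨h1, h2, h3⟩ := pvCoords_mem input s hs
  have h0 : 0 ≤ max s.1 s.2 := le_trans h1 (le_max_left _ _)
  unfold pvL
  omega

lemma pvBpass1 (input : List String) (init : List (Int × Int)) :
    (pvCoords input).foldl (fun res s =>
      (PySem.List.pyRange 0 ((input.length : Int) - max s.1 s.2 - 2) 1).foldl (fun res k =>
        if pvCell input (s.1 + k) (s.2 + k) = 'M' ∧ pvCell input (s.1 + k + 1) (s.2 + k + 1) = 'A'
            ∧ pvCell input (s.1 + k + 2) (s.2 + k + 2) = 'S'
        then res ++ [(s.1 + k + 1, s.2 + k + 1)] else res) res) init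
    = init ++ (pvCoords input).flatMap (fun s => (pvOccs (pvCS input s)).map
        (fun (q : Nat) => (s.1 + (q : Int) + 1, s.2 + (q : Int) + 1))) := by
  refine Eq.trans (PySem.List.foldl_congr_mem _ _
    (fun (res : List (Int × Int)) (s : Int × Int) => res ++ (pvOccs (pvCS input s)).map
      (fun (q : Nat) => (s.1 + (q : Int) + 1, s.2 + (q : Int) + 1))) _ ?_) ?_
  · intro acc s hs
    simp only []
    have hL := pvL_int input s hs
    rw [show (input.length : Int) - max s.1 s.2 - 2 = ((pvL input s : Nat) : Int) - 2 from by
      rw [hL]]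
    have hfwd := pvFwd_eq (pvF input s) (pvL input s) s.1 s.2 acc
    simp only [pvF] at hfwd
    unfold pvCS
    simp only [add_assoc] at hfwd ⊢
    exact hfwd
  · rw [PySem.List.foldl_append_eq_flatMap]

lemma pvBpass2 (input : List String) (init : List (Int × Int)) :
    (pvCoords input).foldl (fun res s =>
      (PySem.List.pyRange ((input.length : Int) - max s.1 s.2 - 3) (-1) (-1)).foldl (fun res k =>
        if pvCell input (s.1 + k) (s.2 + k) = 'S' ∧ pvCell input (s.1 + k + 1) (s.2 + k + 1) = 'A'
            ∧ pvCell input (s.1 + k + 2) (s.2 + k + 2) = 'M'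
        then res ++ [(s.1 + k + 1, s.2 + k + 1)] else res) res) init
    = init ++ (pvCoords input).flatMap (fun s => (pvOccs (pvCS input s).reverse).map
        (fun (p : Nat) => (s.1 + (pvL input s : Int) - (p : Int) - 2,
          s.2 + (pvL input s : Int) - (p : Int) - 2))) := by
  refine Eq.trans (PySem.List.foldl_congr_mem _ _
    (fun (res : List (Int × Int)) (s : Int × Int) => res ++ (pvOccs (pvCS input s).reverse).map
      (fun (p : Nat) => (s.1 + (pvL input s : Int) - (p : Int) - 2,
        s.2 + (pvL input s : Int) - (p : Int) - 2))) _ ?_) ?_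
  · intro acc s hs
    simp only []
    have hL := pvL_int input s hs
    rw [show (input.length : Int) - max s.1 s.2 - 3 = ((pvL input s : Nat) : Int) - 3 from by
      rw [hL]]
    have hrev := pvRev_eq (pvF input s) (pvL input s) s.1 s.2 acc
    simp only [pvF] at hrev
    unfold pvCS
    simp only [add_assoc] at hrev ⊢
    exact hrev
  · rw [PySem.List.foldl_append_eq_flatMap]

lemma pvB_eq (input : List String) : find_mas_diag_lr_alt input = pvNF input := by
  unfold find_mas_diag_lr_alt
  simp only [PySem.List.len_eq]
  rw [PySem.List.pyRange_neg_one_eq_reverse]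
  rw [show (-1 : Int) + 1 = 0 from by norm_num,
      show ((input.length : Int) - 1) + 1 = (input.length : Int) from by ring]
  rw [show ((PySem.List.pyRange 0 (input.length : Int) 1).reverse.map (fun c => ((0 : Int), c))
        ++ (PySem.List.pyRange 1 (input.length : Int) 1).map (fun r => (r, (0 : Int))))
      = pvCoords input from rfl]
  rw [pvBpass1, pvBpass2]
  unfold pvNF
  simp

lemma pvDiag1 (input : List String) (c : Int) (hc : 0 ≤ c) :
    (PySem.List.pyRange 0 ((input.length : Int) - c) 1).foldl
        (fun dl i => dl ++ [pvCell input i (c + i)]) []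
      = pvCS input ((0 : Int), c) := by
  rw [PySem.List.foldl_append_singleton_eq_map, PySem.List.pyRange_one, List.map_map]
  unfold pvCS pvCsOf pvF pvL
  simp only [List.nil_append]
  rw [show ((input.length : Int) - c - 0).toNat
      = ((input.length : Int) - max ((0 : Int), c).1 ((0 : Int), c).2).toNat from by
    simp only []
    rw [show max (0 : Int) c = c from max_eq_right hc]
    omega]
  apply List.map_congr_left
  intro k hk
  simp

lemma pvDiag2 (input : List String) (r : Int) (hr : 0 ≤ r) :
    (PySem.List.pyRange 0 ((input.length : Int) - r) 1).foldl
        (fun dl i => dl ++ [pvCell input (r + i) i]) []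
      = pvCS input (r, (0 : Int)) := by
  rw [PySem.List.foldl_append_singleton_eq_map, PySem.List.pyRange_one, List.map_map]
  unfold pvCS pvCsOf pvF pvL
  simp only [List.nil_append]
  rw [show ((input.length : Int) - r - 0).toNat
      = ((input.length : Int) - max (r, (0 : Int)).1 (r, (0 : Int)).2).toNat from by
    simp only []
    rw [show max r (0 : Int) = r from max_eq_left hr]
    omega]
  apply List.map_congr_left
  intro k hk
  simp

lemma pvFlatMap_congr {α β : Type} (l : List α) (f g : α → List β)
    (h : ∀ x ∈ l, f x = g x) : l.flatMap f = l.flatMap g := by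
  induction l with
  | nil => rfl
  | cons x t ih => simp [h x (by simp), ih (fun y hy => h y (by simp [hy]))]

lemma pvA_eq (input : List String) : find_mas_diag_lr input = pvNF input := by
  unfold find_mas_diag_lr
  simp only [PySem.List.len_eq]
  rw [PySem.List.foldl_prod_mk
    (f := fun (acc : List (List Char)) (c : Int) => acc
      ++ [(PySem.List.pyRange 0 ((input.length : Int) - c) 1).foldl
            (fun dl i => dl ++ [pvCell input i (c + i)]) []])
    (g := fun (acc : List (Int × Int)) (c : Int) => acc ++ [((0 : Int), c)])]
  rw [PySem.List.foldl_prod_mk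
    (f := fun (acc : List (List Char)) (r : Int) => acc
      ++ [(PySem.List.pyRange 0 ((input.length : Int) - r) 1).foldl
            (fun dl i => dl ++ [pvCell input (r + i) i]) []])
    (g := fun (acc : List (Int × Int)) (r : Int) => acc ++ [(r, (0 : Int))])]
  rw [PySem.List.foldl_append_singleton_eq_map, PySem.List.foldl_append_singleton_eq_map,
      PySem.List.foldl_append_singleton_eq_map, PySem.List.foldl_append_singleton_eq_map]
  simp only [List.nil_append]
  rw [show (fun (line : List Char) => (PySem.List.slice? line none none (-1)).getD [])
        = fun (line : List Char) => line.reverse from funext fun line => by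
      rw [PySem.List.slice?_none_none_neg_one]; rfl]
  rw [pvMasRL_false, pvMasRL_true]
  rw [List.map_append, List.map_map, List.map_map]
  rw [List.zip_append (by simp), List.zip_append (by simp)]
  rw [List.zip_map', List.zip_map', List.zip_map', List.zip_map']
  rw [List.flatMap_append, List.flatMap_append]
  rw [List.flatMap_map, List.flatMap_map, List.flatMap_map, List.flatMap_map]
  unfold pvNF pvCoords
  rw [List.flatMap_append, List.flatMap_append,
      List.flatMap_map, List.flatMap_map, List.flatMap_map, List.flatMap_map]
  congr 1
  · congr 1
    · refine pvFlatMap_congr _ _ _ (fun c hc => ?_)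
      rw [List.mem_reverse, PySem.List.mem_pyRange_one] at hc
      rw [pvDiag1 input c hc.1]
    · refine pvFlatMap_congr _ _ _ (fun r hr => ?_)
      rw [PySem.List.mem_pyRange_one] at hr
      rw [pvDiag2 input r (by omega)]
  · congr 1
    · refine pvFlatMap_congr _ _ _ (fun c hc => ?_)
      rw [List.mem_reverse, PySem.List.mem_pyRange_one] at hc
      simp only [Function.comp_def]
      rw [pvDiag1 input c hc.1]
      simp [pvCS, pvLen_csOf]
    · refine pvFlatMap_congr _ _ _ (fun r hr => ?_)
      rw [PySem.List.mem_pyRange_one] at hr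
      simp only [Function.comp_def]
      rw [pvDiag2 input r (by omega)]
      simp [pvCS, pvLen_csOf]

-- ===== VERDICT (by name: the statement is the Claim_ definition above) =====
theorem find_mas_diag_lr_spec : Claim_equal_find_mas_diag_lr := by
  intro input _ _
  unfold Spec_find_mas_diag_lr
  rw [pvA_eq, pvB_eq]
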